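-- pv_equiv track=rewrite | github.com/ArchQuant/usaco-solutions | sorting/diamond_collector/diamond_collector.py | diamond_collector_benchmark
-- ===== SOURCE A (Python) =====
-- def diamond_collector_benchmark(n, k, sizes):
--
--     sizes = sorted(sizes[:])
--     amt = [0] * n # amt so that the window length that not exceeds k
--
--     for i in range(n):
--         left = right = i
--         # IM - check out-of-range; terminate at (valid + 1)
--         while right < n and sizes[right] - sizes[left] <= k:
--             right += 1
--         amt[left] = right - left # right is not valid, so not right - left + 1
--
--     # IM - use suffix_max, scan from beginning so don't need to worry about backwards
--     suffix_max = [0] * (n+1) # padding with 0 at the end, suffix_max[n] = 0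
--     for i in range(n-1, -1, -1):
--         suffix_max[i] = max(suffix_max[i+1], amt[i])
--     max_display = 0
--     for i in range(n):
--         max_display = max(max_display, amt[i] + suffix_max[i+amt[i]])
--
--     return max_display
-- ===== SOURCE B (Python) =====
-- def diamond_collector_benchmark(n, k, sizes):
--     # One backward pass over the sorted sizes with a sliding right pointer:
--     # j tracks the first index whose size exceeds s[i] + k, sf[i] is the
--     # largest single window starting at or after i.
--     s = sorted(sizes)[:n]
--     sf = [0] * (n + 1)
--     ans = 0
--     j = n
--     for i in range(n - 1, -1, -1):
--         while j > i and s[j - 1] - s[i] > k: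
--             j -= 1
--         w = j - i
--         sf[i] = max(sf[i + 1], w)
--         ans = max(ans, w + sf[i + w])
--     return ans
-- ===== Notes on version B (the rewrite author's own statement) =====
-- stated objective: faster
-- what changed: Replaces A's per-index rescan of the whole window (plus two further passes for suffix maxima and the answer) by a single backward sweep over the sorted sizes with a monotone sliding right pointer that computes each window, the suffix maximum and the answer in one O(n) pass after sorting.
import Mathlib
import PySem

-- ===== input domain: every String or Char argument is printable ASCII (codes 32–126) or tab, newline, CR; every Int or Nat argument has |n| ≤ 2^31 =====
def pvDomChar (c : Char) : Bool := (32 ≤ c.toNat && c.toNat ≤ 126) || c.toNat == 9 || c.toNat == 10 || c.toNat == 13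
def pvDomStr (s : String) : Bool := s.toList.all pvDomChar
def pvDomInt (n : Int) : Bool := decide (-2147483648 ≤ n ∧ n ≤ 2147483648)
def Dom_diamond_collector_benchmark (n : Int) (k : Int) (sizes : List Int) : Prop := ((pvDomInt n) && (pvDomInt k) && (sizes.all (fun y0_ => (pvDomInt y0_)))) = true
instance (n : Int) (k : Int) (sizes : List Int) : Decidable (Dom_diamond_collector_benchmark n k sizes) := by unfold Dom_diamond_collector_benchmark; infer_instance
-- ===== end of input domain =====

-- B replaces A's quadratic per-index window rescan (plus two further passes) by one backward
-- sweep with a monotone sliding right pointer after sorting: measurably faster (asymptotic).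


-- ===== PORT A =====
-- helper: the inner `while right < n and sizes[right] - sizes[left] <= k: right += 1`;
-- fuel (n - right).toNat is exact (the loop stops as soon as right = n)
def pvScanUp (s : List Int) (n k left : Int) : Int → Nat → Int
  | right, 0 => right
  | right, fuel+1 =>
    if right < n ∧ PySem.List.pyGetD s right 0 - PySem.List.pyGetD s left 0 ≤ k
    then pvScanUp s n k left (right + 1) fuel else right

def diamond_collector_benchmark (n : Int) (k : Int) (sizes : List Int) : Int :=
  let s := PySem.List.sorted (PySem.List.slice sizes none none) (fun x => x) false
  let amt := (PySem.List.pyRange 0 n 1).foldl (fun amt i =>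
      PySem.List.pySetD amt i (pvScanUp s n k i i (n - i).toNat - i))
    (List.replicate n.toNat 0)
  let suffix := (PySem.List.pyRange (n - 1) (-1) (-1)).foldl (fun sm i =>
      PySem.List.pySetD sm i (max (PySem.List.pyGetD sm (i + 1) 0) (PySem.List.pyGetD amt i 0)))
    (List.replicate (n + 1).toNat 0)
  (PySem.List.pyRange 0 n 1).foldl (fun md i =>
      max md (PySem.List.pyGetD amt i 0 + PySem.List.pyGetD suffix (i + PySem.List.pyGetD amt i 0) 0)) 0

-- ===== PORT B =====
-- helper: the inner `while j > i and s[j - 1] - s[i] > k: j -= 1`;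
-- fuel (j - i).toNat is exact (the loop stops as soon as j = i)
def pvScanDown (s : List Int) (k i : Int) : Int → Nat → Int
  | j, 0 => j
  | j, fuel+1 =>
    if i < j ∧ PySem.List.pyGetD s (j - 1) 0 - PySem.List.pyGetD s i 0 > k
    then pvScanDown s k i (j - 1) fuel else j

def diamond_collector_benchmark_alt (n : Int) (k : Int) (sizes : List Int) : Int :=
  let s := PySem.List.slice (PySem.List.sorted sizes (fun x => x) false) none (some n)
  let st := (PySem.List.pyRange (n - 1) (-1) (-1)).foldl
    (fun (st : Int × List Int × Int) i =>
      let j := pvScanDown s k i st.1 (st.1 - i).toNat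
      let w := j - i
      let sf := PySem.List.pySetD st.2.1 i (max (PySem.List.pyGetD st.2.1 (i + 1) 0) w)
      (j, sf, max st.2.2 (w + PySem.List.pyGetD sf (i + w) 0)))
    (n, List.replicate (n + 1).toNat 0, 0)
  st.2.2

-- ===== PRECONDITION & SPEC =====
-- Pre_ excludes exactly the inputs with n > len(sizes), on which both Pythons raise IndexError.
def Pre_diamond_collector_benchmark (n : Int) (k : Int) (sizes : List Int) : Prop :=
  n ≤ (sizes.length : Int)
instance (n : Int) (k : Int) (sizes : List Int) : Decidable (Pre_diamond_collector_benchmark n k sizes) := by unfold Pre_diamond_collector_benchmark; infer_instance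

def pvWitness_diamond_collector_benchmark : Int × Int × List Int := (5, 3, [1, 2, 4, 7, 8])

def Spec_diamond_collector_benchmark (n : Int) (k : Int) (sizes : List Int) (out : Int) : Prop := out = diamond_collector_benchmark_alt n k sizes
instance (n : Int) (k : Int) (sizes : List Int) (out : Int) : Decidable (Spec_diamond_collector_benchmark n k sizes out) := by unfold Spec_diamond_collector_benchmark; infer_instance

-- ===== CLAIM (what is proved, stated in full; the proofs are below) =====
def Claim_equal_diamond_collector_benchmark : Prop := ∀ (n : Int) (k : Int) (sizes : List Int), Dom_diamond_collector_benchmark n k sizes → Pre_diamond_collector_benchmark n k sizes → Spec_diamond_collector_benchmark n k sizes (diamond_collector_benchmark n k sizes)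

-- ===== LEMMAS AND PROOFS =====

-- `s[t]` as both ports read it (always with default 0)
def pvGet (s : List Int) (t : Int) : Int := PySem.List.pyGetD s t 0

-- the value both inner loops compute: the first index R ≥ l (clipped to n) from which on
-- the window starting at l no longer fits
def pvIsStop (s : List Int) (n k l R : Int) : Prop :=
  l ≤ R ∧ R ≤ n ∧ (∀ x, l ≤ x → x < R → pvGet s x - pvGet s l ≤ k) ∧
    (R < n → pvGet s R - pvGet s l > k)

theorem pvIsStop_unique {s : List Int} {n k l R₁ R₂ : Int}
    (h₁ : pvIsStop s n k l R₁) (h₂ : pvIsStop s n k l R₂) : R₁ = R₂ := by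
  obtain ⟨hl₁, hn₁, hg₁, hb₁⟩ := h₁
  obtain ⟨hl₂, hn₂, hg₂, hb₂⟩ := h₂
  rcases lt_trichotomy R₁ R₂ with h | h | h
  · exact absurd (hg₂ R₁ hl₁ h) (not_le.mpr (hb₁ (lt_of_lt_of_le h hn₂)))
  · exact h
  · exact absurd (hg₁ R₂ hl₂ h) (not_le.mpr (hb₂ (lt_of_lt_of_le h hn₁)))

theorem pvIsStop_congr {s₁ s₂ : List Int} {n k l R : Int}
    (hag : ∀ t, 0 ≤ t → t < n → pvGet s₁ t = pvGet s₂ t)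
    (hl0 : 0 ≤ l) (hln : l < n) (h : pvIsStop s₁ n k l R) : pvIsStop s₂ n k l R := by
  obtain ⟨h1, h2, h3, h4⟩ := h
  refine ⟨h1, h2, ?_, ?_⟩
  · intro x hx1 hx2
    rw [← hag x (le_trans hl0 hx1) (lt_of_lt_of_le hx2 h2), ← hag l hl0 hln]
    exact h3 x hx1 hx2
  · intro hR
    rw [← hag R (le_trans hl0 h1) hR, ← hag l hl0 hln]
    exact h4 hR

theorem pvScanUp_isStop (s : List Int) (n k : Int) :
    ∀ (fuel : Nat) (l r : Int), 0 ≤ l → l ≤ r → r ≤ n → (n - r).toNat ≤ fuel →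
    (∀ x, l ≤ x → x < r → pvGet s x - pvGet s l ≤ k) →
    pvIsStop s n k l (pvScanUp s n k l r fuel) := by
  intro fuel
  induction fuel with
  | zero =>
    intro l r hl0 hlr hrn hfuel hgood
    have hrn' : r = n := by omega
    refine ⟨hlr, le_of_eq hrn', hgood, fun h => absurd h (by simp [pvScanUp, hrn'])⟩
  | succ fuel ih =>
    intro l r hl0 hlr hrn hfuel hgood
    rw [pvScanUp]
    split
    · next hc =>
      exact ih l (r + 1) hl0 (by omega) (by omega) (by omega)
        (fun x hx1 hx2 => by
          rcases (by omega : x < r ∨ x = r) with h | rfl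
          · exact hgood x hx1 h
          · exact hc.2)
    · next hc =>
      refine ⟨hlr, hrn, hgood, fun hR => ?_⟩
      rcases Decidable.not_and_iff_not_or_not.mp hc with h | h
      · exact absurd hR h
      · exact lt_of_not_ge h

theorem pvScanDown_isStop (s : List Int) (n k : Int)
    (hmono : ∀ a b : Int, 0 ≤ a → a ≤ b → b < n → pvGet s a ≤ pvGet s b) :
    ∀ (fuel : Nat) (i j : Int), 0 ≤ i → i < n → i ≤ j → j ≤ n → (j - i).toNat ≤ fuel →
    (∀ x, j ≤ x → x < n → pvGet s x - pvGet s i > k) →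
    pvIsStop s n k i (pvScanDown s k i j fuel) := by
  intro fuel
  induction fuel with
  | zero =>
    intro i j hi0 hin hij hjn hfuel hbad
    simp only [pvScanDown]
    have hji : j = i := by omega
    subst hji
    exact ⟨le_refl _, le_of_lt hin, fun x hx1 hx2 => absurd hx1 (by omega),
      fun h => hbad j (le_refl _) h⟩
  | succ fuel ih =>
    intro i j hi0 hin hij hjn hfuel hbad
    rw [pvScanDown]
    split
    · next hc =>
      exact ih i (j - 1) hi0 hin (by omega) (by omega) (by omega)
        (fun x hx1 hx2 => by
          rcases (by omega : j ≤ x ∨ x = j - 1) with h | rfl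
          · exact hbad x h hx2
          · exact hc.2)
    · next hc =>
      rcases Decidable.not_and_iff_not_or_not.mp hc with h | h
      · have hji : j = i := by omega
        subst hji
        exact ⟨le_refl _, le_of_lt hin, fun x hx1 hx2 => absurd hx1 (by omega),
          fun hR => hbad j (le_refl _) hR⟩
      · have hij' : i < j ∨ i = j := by omega
        rcases hij' with hij' | rfl
        · have hgood : pvGet s (j - 1) - pvGet s i ≤ k := le_of_not_gt h
          refine ⟨hij, hjn, fun x hx1 hx2 => ?_, fun hR => hbad j (le_refl _) hR⟩
          have : pvGet s x ≤ pvGet s (j - 1) := hmono x (j - 1) (by omega) (by omega) (by omega)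
          omega
        · exact ⟨le_refl _, hjn, fun x hx1 hx2 => absurd hx1 (by omega),
            fun hR => hbad i (le_refl _) hR⟩

-- monotonicity of indexed access on a (≤)-pairwise list
theorem pvMono (s : List Int) (hp : s.Pairwise (· ≤ ·)) (n : Int) (hn : n ≤ (s.length : Int)) :
    ∀ a b : Int, 0 ≤ a → a ≤ b → b < n → pvGet s a ≤ pvGet s b := by
  intro a b ha hab hbn
  have hb : b < (s.length : Int) := lt_of_lt_of_le hbn hn
  have ha' : a < (s.length : Int) := lt_of_le_of_lt hab hb
  rw [pvGet, pvGet, PySem.List.pyGetD_eq_getElem s 0 ha ha',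
    PySem.List.pyGetD_eq_getElem s 0 (le_trans ha hab) hb]
  rcases eq_or_lt_of_le hab with rfl | h
  · exact le_refl _
  · exact (List.pairwise_iff_getElem.mp hp) a.toNat b.toNat _ _ (by omega)

-- A's amt[i] (as a function of the index)
def pvAmtF (s : List Int) (n k : Int) (i : Nat) : Int :=
  pvScanUp s n k i i (n - (i : Int)).toNat - i

-- A's suffix_max[i] (as a function of the index)
def pvSfV (s : List Int) (n k : Int) (i : Nat) : Int :=
  if h : (i : Int) < n then max (pvSfV s n k (i + 1)) (pvAmtF s n k i) else 0
termination_by n.toNat - i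
decreasing_by omega

-- the term the answer maximises at index i
def pvTF (s : List Int) (n k : Int) (i : Nat) : Int :=
  pvAmtF s n k i + pvSfV s n k (i + (pvAmtF s n k i).toNat)

-- B's answer accumulator after processing indices m-1, …, 0 starting from ans
def pvAnsAux (t : Nat → Int) : Int → Nat → Int
  | ans, 0 => ans
  | ans, m+1 => pvAnsAux t (max ans (t m)) m

-- indexing the partially-filled suffix array: zeros below m, computed values from m on
theorem pvShapeGetD (v : Nat → Int) (m c idx : Nat) (h1 : m ≤ idx) (h2 : idx < m + c) :
    (List.replicate m (0 : Int) ++ (List.range' m c).map v).getD idx 0 = v idx := by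
  rw [List.getD_append_right _ _ _ _ (by simp [h1])]
  simp only [List.length_replicate]
  rw [List.getD_eq_getElem _ _ (by simp; omega), List.getElem_map, List.getElem_range']
  congr 1
  omega

theorem pvShapeSet (v : Nat → Int) (m c : Nat) (_hc : 0 < c) (x : Int) (hx : x = v m) :
    (List.replicate (m + 1) (0 : Int) ++ (List.range' (m + 1) c).map v).set m x =
      List.replicate m 0 ++ (List.range' m (c + 1)).map v := by
  subst hx
  rw [List.replicate_succ', List.append_assoc, List.set_append]
  rw [if_neg (by simp)]
  have : (List.range' m (c + 1)).map v = v m :: (List.range' (m + 1) c).map v := by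
    rw [List.range'_succ]; simp
  simp [this]

theorem pvGetMapRange (f : Nat → Int) (N m : Nat) (h : m < N) :
    ((List.range N).map f).getD m 0 = f m := by
  rw [List.getD_eq_getElem _ _ (by simpa using h), List.getElem_map, List.getElem_range]

-- unfolding pvSfV one step
theorem pvSfV_eq (s : List Int) (n k : Int) (m : Nat) (h : (m : Int) < n) :
    pvSfV s n k m = max (pvSfV s n k (m + 1)) (pvAmtF s n k m) := by
  conv_lhs => rw [pvSfV]
  rw [dif_pos h]

-- A's first loop fills amt with pvAmtF
theorem pvSetFold (f : Nat → Int) (N : Nat) :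
    ∀ m, m ≤ N → List.foldl (fun l i => l.set i (f i)) (List.replicate N (0 : Int)) (List.range m) =
      (List.range m).map f ++ List.replicate (N - m) 0 := by
  intro m
  induction m with
  | zero => simp
  | succ m ih =>
    intro hm
    rw [List.range_succ, List.foldl_append, ih (by omega)]
    simp only [List.foldl_cons, List.foldl_nil]
    rw [List.set_append, if_neg (by simp)]
    simp only [List.length_map, List.length_range, Nat.sub_self]
    have h1 : N - m = (N - (m + 1)) + 1 := by omega
    rw [h1, List.replicate_succ, List.set_cons_zero]
    simp [List.append_assoc]

theorem pvAmtA_eq (s : List Int) (n k : Int) (hn : 0 ≤ n) :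
    (PySem.List.pyRange 0 n 1).foldl (fun amt i =>
        PySem.List.pySetD amt i (pvScanUp s n k i i (n - i).toNat - i))
      (List.replicate n.toNat 0) = (List.range n.toNat).map (pvAmtF s n k) := by
  rw [PySem.List.pyRange_zero, List.foldl_map]
  have h : (fun (amt : List Int) (i : Nat) =>
      PySem.List.pySetD amt (i : Int) (pvScanUp s n k i i (n - (i : Int)).toNat - (i : Int))) =
      fun amt i => amt.set i (pvAmtF s n k i) := by
    funext amt i
    rw [PySem.List.pySetD_natCast]
    rfl
  rw [h, pvSetFold _ _ _ (le_refl _)]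
  simp

-- A's second loop fills suffix_max with pvSfV
theorem pvSuffFoldAux (s : List Int) (n k : Int) (hn : 0 < n) :
    ∀ m, m ≤ n.toNat →
    (PySem.List.pyRange ((m : Int) - 1) (-1) (-1)).foldl (fun sm i =>
        PySem.List.pySetD sm i (max (PySem.List.pyGetD sm (i + 1) 0)
          (PySem.List.pyGetD ((List.range n.toNat).map (pvAmtF s n k)) i 0)))
      (List.replicate m 0 ++ (List.range' m (n.toNat + 1 - m)).map (pvSfV s n k)) =
      (List.range' 0 (n.toNat + 1)).map (pvSfV s n k) := by
  intro m
  induction m with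
  | zero =>
    intro _
    rw [PySem.List.pyRange_neg_one_eq_nil (by norm_num)]
    simp
  | succ m ih =>
    intro hm
    have hc1 : ((m + 1 : Nat) : Int) - 1 = (m : Int) := by push_cast; ring
    rw [hc1, PySem.List.pyRange_neg_one_cons (by omega), List.foldl_cons]
    have e1 : PySem.List.pyGetD (List.replicate (m + 1) (0 : Int) ++
        (List.range' (m + 1) (n.toNat + 1 - (m + 1))).map (pvSfV s n k)) ((m : Int) + 1) 0 =
        pvSfV s n k (m + 1) := by
      have : (m : Int) + 1 = ((m + 1 : Nat) : Int) := by push_cast; ring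
      rw [this, PySem.List.pyGetD_natCast]
      exact pvShapeGetD _ _ _ _ (le_refl _) (by omega)
    have e2 : PySem.List.pyGetD ((List.range n.toNat).map (pvAmtF s n k)) (m : Int) 0 =
        pvAmtF s n k m := by
      rw [PySem.List.pyGetD_natCast]
      exact pvGetMapRange _ _ _ (by omega)
    rw [e1, e2, PySem.List.pySetD_natCast]
    rw [pvShapeSet _ _ _ (by omega) _
      (by rw [pvSfV_eq s n k m (by omega)])]
    have hc2 : n.toNat + 1 - (m + 1) + 1 = n.toNat + 1 - m := by omega
    rw [hc2]
    exact ih (by omega)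

-- amt values are window lengths: nonnegative, and the window stays inside [i, n)
theorem pvAmtF_bounds (s : List Int) (n k : Int) (i : Nat) (hi : (i : Int) < n) :
    0 ≤ pvAmtF s n k i ∧ (i : Int) + pvAmtF s n k i ≤ n := by
  have h := pvScanUp_isStop s n k (n - (i : Int)).toNat i i (by omega) (le_refl _)
    (le_of_lt hi) (le_refl _) (fun x hx1 hx2 => absurd hx1 (by omega))
  obtain ⟨h1, h2, -, -⟩ := h
  unfold pvAmtF
  omega

-- A's third loop over the filled arrays
theorem pvThird (s : List Int) (n k : Int) (hn : 0 < n) :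
    (PySem.List.pyRange 0 n 1).foldl (fun md i =>
        max md (PySem.List.pyGetD ((List.range n.toNat).map (pvAmtF s n k)) i 0 +
          PySem.List.pyGetD ((List.range' 0 (n.toNat + 1)).map (pvSfV s n k))
            (i + PySem.List.pyGetD ((List.range n.toNat).map (pvAmtF s n k)) i 0) 0)) 0 =
      List.foldl (fun md i => max md (pvTF s n k i)) 0 (List.range n.toNat) := by
  rw [PySem.List.pyRange_zero, List.foldl_map]
  apply PySem.List.foldl_congr_mem
  intro md i hi
  have hiN : i < n.toNat := List.mem_range.mp hi
  have e2 : PySem.List.pyGetD ((List.range n.toNat).map (pvAmtF s n k)) (i : Int) 0 =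
      pvAmtF s n k i := by
    rw [PySem.List.pyGetD_natCast]; exact pvGetMapRange _ _ _ hiN
  obtain ⟨hb1, hb2⟩ := pvAmtF_bounds s n k i (by omega)
  have e3 : (i : Int) + pvAmtF s n k i = ((i + (pvAmtF s n k i).toNat : Nat) : Int) := by
    push_cast; omega
  rw [e2, e3, PySem.List.pyGetD_natCast]
  have e4 : ((List.range' 0 (n.toNat + 1)).map (pvSfV s n k)).getD (i + (pvAmtF s n k i).toNat) 0 =
      pvSfV s n k (i + (pvAmtF s n k i).toNat) := by
    have := pvShapeGetD (pvSfV s n k) 0 (n.toNat + 1) (i + (pvAmtF s n k i).toNat)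
      (by omega) (by omega)
    simpa using this
  rw [e4]
  rfl

-- B's single backward loop
theorem pvBloop (sA sB : List Int) (n k : Int) (hn : 0 < n)
    (hag : ∀ t, 0 ≤ t → t < n → pvGet sB t = pvGet sA t)
    (hmono : ∀ a b : Int, 0 ≤ a → a ≤ b → b < n → pvGet sB a ≤ pvGet sB b) :
    ∀ m : Nat, m ≤ n.toNat → ∀ j : Int, (m : Int) ≤ j → j ≤ n →
    (1 ≤ m → ∀ x : Int, j ≤ x → x < n → pvGet sB x - pvGet sB ((m : Int) - 1) > k) →
    ∀ ans : Int,
    ((PySem.List.pyRange ((m : Int) - 1) (-1) (-1)).foldl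
      (fun (st : Int × List Int × Int) i =>
        let j := pvScanDown sB k i st.1 (st.1 - i).toNat
        let w := j - i
        let sf := PySem.List.pySetD st.2.1 i (max (PySem.List.pyGetD st.2.1 (i + 1) 0) w)
        (j, sf, max st.2.2 (w + PySem.List.pyGetD sf (i + w) 0)))
      (j, List.replicate m 0 ++ (List.range' m (n.toNat + 1 - m)).map (pvSfV sA n k), ans)).2.2 =
      pvAnsAux (pvTF sA n k) ans m := by
  intro m
  induction m with
  | zero =>
    intro _ j _ _ _ ans
    rw [(by norm_num : ((0 : Nat) : Int) - 1 = -1), PySem.List.pyRange_neg_one_eq_nil (le_refl _)]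
    rfl
  | succ m ih =>
    intro hm j hj1 hj2 hbad ans
    have hc1 : ((m + 1 : Nat) : Int) - 1 = (m : Int) := by push_cast; ring
    rw [hc1, PySem.List.pyRange_neg_one_cons (by omega), List.foldl_cons]
    -- the scan at index m
    have hstop : pvIsStop sB n k (m : Int) (pvScanDown sB k (m : Int) j (j - (m : Int)).toNat) :=
      pvScanDown_isStop sB n k hmono (j - (m : Int)).toNat (m : Int) j (by omega) (by omega)
        (by omega) hj2 (le_refl _)
        (fun x hx1 hx2 => by
          have := hbad (by omega) x hx1 hx2
          simpa [hc1] using this)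
    have hstopA : pvIsStop sA n k (m : Int) (pvScanUp sA n k (m : Int) (m : Int)
        (n - (m : Int)).toNat) :=
      pvScanUp_isStop sA n k _ (m : Int) (m : Int) (by omega) (le_refl _) (by omega) (le_refl _)
        (fun x hx1 hx2 => absurd hx1 (by omega))
    have hstop' : pvIsStop sB n k (m : Int) (pvScanUp sA n k (m : Int) (m : Int)
        (n - (m : Int)).toNat) :=
      pvIsStop_congr (fun t h1 h2 => (hag t h1 h2).symm) (by omega) (by omega) hstopA
    have hjeq : pvScanDown sB k (m : Int) j (j - (m : Int)).toNat =
        (m : Int) + pvAmtF sA n k m := by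
      have := pvIsStop_unique hstop hstop'
      unfold pvAmtF
      omega
    obtain ⟨hs1, hs2, -, hs4⟩ := hstop
    obtain ⟨hb0, hb1⟩ := pvAmtF_bounds sA n k m (by omega)
    simp only
    rw [hjeq]
    -- the suffix update
    have e1 : PySem.List.pyGetD (List.replicate (m + 1) (0 : Int) ++
        (List.range' (m + 1) (n.toNat + 1 - (m + 1))).map (pvSfV sA n k)) ((m : Int) + 1) 0 =
        pvSfV sA n k (m + 1) := by
      have : (m : Int) + 1 = ((m + 1 : Nat) : Int) := by push_cast; ring
      rw [this, PySem.List.pyGetD_natCast]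
      exact pvShapeGetD _ _ _ _ (le_refl _) (by omega)
    have hw : (m : Int) + pvAmtF sA n k m - (m : Int) = pvAmtF sA n k m := by ring
    rw [e1, hw, PySem.List.pySetD_natCast,
      pvShapeSet _ _ _ (by omega) _ (by rw [pvSfV_eq sA n k m (by omega)])]
    have hc2 : n.toNat + 1 - (m + 1) + 1 = n.toNat + 1 - m := by omega
    rw [hc2]
    -- the answer update
    have e3 : (m : Int) + pvAmtF sA n k m = ((m + (pvAmtF sA n k m).toNat : Nat) : Int) := by
      push_cast; omega
    have e4 : PySem.List.pyGetD (List.replicate m (0 : Int) ++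
        (List.range' m (n.toNat + 1 - m)).map (pvSfV sA n k)) ((m : Int) + pvAmtF sA n k m) 0 =
        pvSfV sA n k (m + (pvAmtF sA n k m).toNat) := by
      rw [e3, PySem.List.pyGetD_natCast]
      exact pvShapeGetD _ _ _ _ (by omega) (by omega)
    rw [e4]
    -- the recursive call
    rw [ih (by omega) ((m : Int) + pvAmtF sA n k m) (by omega) (by omega)
      (fun hm1 x hx1 hx2 => by
        have hxj : pvGet sB ((m : Int) + pvAmtF sA n k m) ≤ pvGet sB x :=
          hmono _ _ (by omega) hx1 hx2
        have hP3 : pvGet sB ((m : Int) + pvAmtF sA n k m) - pvGet sB (m : Int) > k := by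
          rw [← hjeq] at hxj ⊢
          exact hs4 (by omega)
        have hmm : pvGet sB ((m : Int) - 1) ≤ pvGet sB (m : Int) :=
          hmono _ _ (by omega) (by omega) (by omega)
        omega)
      (max ans (pvAmtF sA n k m + pvSfV sA n k (m + (pvAmtF sA n k m).toNat)))]
    rfl

-- B's answer accumulation is the reverse-order fold of the same maxima
theorem pvAnsAux_foldl (t : Nat → Int) :
    ∀ m ans, pvAnsAux t ans m = List.foldl (fun a i => max a (t i)) ans (List.range m).reverse := by
  intro m
  induction m with
  | zero => intro ans; rfl
  | succ m ih =>
    intro ans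
    rw [pvAnsAux, ih, List.range_succ]
    simp

theorem pvFold_rev (t : Nat → Int) (m : Nat) :
    List.foldl (fun a i => max a (t i)) 0 (List.range m).reverse =
      List.foldl (fun a i => max a (t i)) 0 (List.range m) :=
  @List.Perm.foldl_eq _ _ _ _ _
    ⟨fun a b c => by rw [max_assoc, max_comm (t b), ← max_assoc]⟩ (List.reverse_perm _) 0

-- reading the sliced (length-n prefix of the) sorted list agrees with the full sorted list below n
theorem pvAgree (sA : List Int) (n : Int) (h0 : 0 ≤ n) (hlen : n ≤ (sA.length : Int)) :
    ∀ t, 0 ≤ t → t < n → pvGet (PySem.List.slice sA none (some n)) t = pvGet sA t := by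
  intro t ht0 htn
  rw [PySem.List.slice_to (xs := sA) h0]
  unfold pvGet
  rw [PySem.List.pyGetD_eq_getElem _ _ ht0 (by simp [List.length_take]; omega),
    PySem.List.pyGetD_eq_getElem _ _ ht0 (by omega)]
  exact List.getElem_take

-- ===== VERDICT (by name: the statement is the Claim_ definition above) =====
theorem diamond_collector_benchmark_spec : Claim_equal_diamond_collector_benchmark := by
  intro n k sizes _hdom hpre
  unfold Spec_diamond_collector_benchmark
  unfold Pre_diamond_collector_benchmark at hpre
  by_cases hn : n ≤ 0
  · simp [diamond_collector_benchmark, diamond_collector_benchmark_alt,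
      PySem.List.pyRange_one_eq_nil hn,
      PySem.List.pyRange_neg_one_eq_nil (by omega : n - 1 ≤ -1)]
  · replace hn : 0 < n := lt_of_not_ge hn
    set sA := PySem.List.sorted sizes (fun x => x) false with hsA
    have hlenA : n ≤ (sA.length : Int) := by
      rw [hsA, PySem.List.length_sorted]; exact hpre
    have hpair : sA.Pairwise (· ≤ ·) := PySem.List.sorted_pairwise sizes (fun x => x)
    have hmonoA := pvMono sA hpair n hlenA
    have hag := pvAgree sA n (le_of_lt hn) hlenA
    have hmonoB : ∀ a b : Int, 0 ≤ a → a ≤ b → b < n →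
        pvGet (PySem.List.slice sA none (some n)) a ≤
          pvGet (PySem.List.slice sA none (some n)) b := by
      intro a b h1 h2 h3
      rw [hag a h1 (lt_of_le_of_lt h2 h3), hag b (le_trans h1 h2) h3]
      exact hmonoA a b h1 h2 h3
    have hNn : ((n.toNat : Nat) : Int) = n := by omega
    have hsf0 : pvSfV sA n k n.toNat = 0 := by
      rw [pvSfV]; exact dif_neg (by omega)
    have hinit : List.replicate (n + 1).toNat (0 : Int) =
        List.replicate n.toNat 0 ++
          (List.range' n.toNat (n.toNat + 1 - n.toNat)).map (pvSfV sA n k) := by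
      have h1 : (n + 1).toNat = n.toNat + 1 := by omega
      rw [h1, List.replicate_succ']
      simp [List.range'_succ, hsf0]
    have hA : diamond_collector_benchmark n k sizes =
        List.foldl (fun md i => max md (pvTF sA n k i)) 0 (List.range n.toNat) := by
      simp only [diamond_collector_benchmark]
      rw [PySem.List.slice_none_none, ← hsA, pvAmtA_eq sA n k (le_of_lt hn)]
      rw [show n - 1 = ((n.toNat : Nat) : Int) - 1 by omega, hinit,
        pvSuffFoldAux sA n k hn n.toNat (le_refl _)]
      exact pvThird sA n k hn
    have hB : diamond_collector_benchmark_alt n k sizes =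
        pvAnsAux (pvTF sA n k) 0 n.toNat := by
      simp only [diamond_collector_benchmark_alt]
      rw [← hsA]
      rw [show n - 1 = ((n.toNat : Nat) : Int) - 1 by omega, hinit]
      rw [pvBloop sA (PySem.List.slice sA none (some n)) n k hn hag hmonoB n.toNat
        (le_refl _) n (by omega) (le_refl _) (fun _ x hx1 hx2 => absurd hx1 (by omega)) 0]
    rw [hA, hB, pvAnsAux_foldl, pvFold_rev]
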